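-- pv_equiv track=rewrite | github.com/gimkuku/Algorithm | KaKaoBlind2018/rotatebracket.py | checkstack
-- ===== SOURCE A (Python) =====
-- def checkpair(a,b):
--     if a == '(':
--         if b == ')': return True
--     elif a ==  '{':
--         if b == '}': return True
--     elif a ==  '[':
--         if b == ']': return True
--     return False
--
-- def checkstack(origins):
--     s = origins[:]
--     stack = []
--     top = -1
--     answer = 0
--     for i in s:
--         new = i
--         if top != -1:
--             if (checkpair(stack[top],new)):
--                 stack.pop()
--                 if top == 0:
--                     answer = answer +1
--                 top = top -1
--             else:
--                 stack.append(new)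
--                 top = top +1
--         else :
--             stack.append(new)
--             top = top +1
--     if top == -1 :
--         return answer
--     else:
--         return 0
-- ===== SOURCE B (Python) =====
-- def checkstack(origins):
--     # Pass 1: type-aware stack validity check; pass 2: depth counter zero-returns.
--     match = {')': '(', ']': '[', '}': '{'}
--     stack = []
--     for ch in origins:
--         if ch in ('(', '[', '{'):
--             stack.append(ch)
--         elif ch in (')', ']', '}'):
--             if not stack or stack[-1] != match[ch]:
--                 return 0
--             stack.pop()
--         else:
--             return 0
--     if stack:
--         return 0
--     depth = 0
--     count = 0
--     for ch in origins:
--         if ch in ('(', '[', '{'):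
--             depth += 1
--         else:
--             depth -= 1
--             if depth == 0:
--                 count += 1
--     return count
-- ===== Notes on version B (the rewrite author's own statement) =====
-- stated objective: alternative
-- what changed: A runs one mixed stack with a manual top index that also pushes mismatched closers and counts emptyings in-loop; B splits the job into a validity pass (typed stack with a closer->opener dict that returns 0 immediately on the first invalid character) and, only if valid, a second pass counting returns of a plain depth counter to 0.
import Mathlib
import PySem

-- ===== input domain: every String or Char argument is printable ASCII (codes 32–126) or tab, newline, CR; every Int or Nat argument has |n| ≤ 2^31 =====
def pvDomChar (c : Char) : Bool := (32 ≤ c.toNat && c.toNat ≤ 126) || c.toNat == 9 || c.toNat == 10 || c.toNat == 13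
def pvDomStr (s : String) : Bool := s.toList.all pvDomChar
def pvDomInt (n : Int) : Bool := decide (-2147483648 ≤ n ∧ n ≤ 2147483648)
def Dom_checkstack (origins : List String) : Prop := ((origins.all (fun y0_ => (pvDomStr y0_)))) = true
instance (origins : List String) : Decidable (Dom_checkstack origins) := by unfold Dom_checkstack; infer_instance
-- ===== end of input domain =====

-- B re-decomposes A's single mixed stack-with-top-index loop into two passes: a typed validity
-- stack (early 0 on any invalid character) and, only when valid, a depth counter counting returns
-- to zero; same return value (alternative decomposition, no speed claim).

-- ===== PORT A =====
def checkpair (a b : String) : Bool :=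
  if a = "(" then (if b = ")" then true else false)
  else if a = "{" then (if b = "}" then true else false)
  else if a = "[" then (if b = "]" then true else false)
  else false

-- one iteration of A's for-loop over state (stack, top, answer)
def checkstackStep (st : List String × Int × Int) (i : String) : List String × Int × Int :=
  let stack := st.1
  let top := st.2.1
  let answer := st.2.2
  let new := i
  if top ≠ -1 then
    if checkpair ((PySem.List.pyGet? stack top).getD "") new then
      -- stack[top]: A keeps top = len(stack)-1, so pyGet? is always some; the "" default is unreachable.
      -- stack.pop() with top = len-1 removes the last element (return value unused).
      let stack' := stack.dropLast
      let answer' := if top = 0 then answer + 1 else answer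
      (stack', top - 1, answer')
    else (stack ++ [new], top + 1, answer)
  else (stack ++ [new], top + 1, answer)

def checkstack (origins : List String) : Int :=
  let s := origins  -- s = origins[:] copies the list; the copy holds the same elements
  let res := s.foldl checkstackStep ([], -1, 0)
  if res.2.1 = -1 then res.2.2 else 0

-- ===== PORT B =====
def bracketMatch : PySem.Dict String String := PySem.Dict.ofList [(")", "("), ("]", "["), ("}", "{")]

-- one iteration of B's validity pass; none = the Python early 'return 0' was taken
def pass1Step (acc : Option (List String)) (ch : String) : Option (List String) :=
  match acc with
  | none => none
  | some stack =>
    if ch = "(" ∨ ch = "[" ∨ ch = "{" then some (stack ++ [ch])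
    else if ch = ")" ∨ ch = "]" ∨ ch = "}" then
      match stack.getLast? with  -- stack[-1]; none = 'not stack'
      | none => none
      | some t =>
        -- match[ch]: ch is one of the three closers here, so the lookup always hits; "" unreachable
        if t ≠ (PySem.Dict.get? bracketMatch ch).getD "" then none else some stack.dropLast
    else none

-- one iteration of B's counting pass over (depth, count)
def pass2Step (p : Int × Int) (ch : String) : Int × Int :=
  if ch = "(" ∨ ch = "[" ∨ ch = "{" then (p.1 + 1, p.2)
  else
    let d := p.1 - 1
    (d, if d = 0 then p.2 + 1 else p.2)

def checkstack_alt (origins : List String) : Int :=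
  match origins.foldl pass1Step (some []) with
  | some [] => (origins.foldl pass2Step (0, 0)).2
  | _ => 0

-- ===== PRECONDITION & SPEC =====
def Spec_checkstack (origins : List String) (out : Int) : Prop := out = checkstack_alt origins
instance (origins : List String) (out : Int) : Decidable (Spec_checkstack origins out) := by unfold Spec_checkstack; infer_instance

-- ===== CLAIM (what is proved, stated in full; the proofs are below) =====
def Claim_equal_checkstack : Prop := ∀ (origins : List String), Dom_checkstack origins → Spec_checkstack origins (checkstack origins)

-- ===== LEMMAS AND PROOFS =====

def IsOpn (s : String) : Prop := s = "(" ∨ s = "[" ∨ s = "{"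

lemma checkpair_open {a b : String} (h : checkpair a b = true) : IsOpn a := by
  unfold checkpair at h
  unfold IsOpn
  split_ifs at h <;> simp_all

lemma checkpair_false_of_not_closer {a b : String}
    (h : ¬(b = ")" ∨ b = "]" ∨ b = "}")) : checkpair a b = false := by
  unfold checkpair
  simp only [not_or] at h
  split_ifs <;> simp_all

lemma checkpair_iff_match {t ch : String} (hc : ch = ")" ∨ ch = "]" ∨ ch = "}") :
    checkpair t ch = true ↔ t = (PySem.Dict.get? bracketMatch ch).getD "" := by
  rcases hc with h | h | h <;> subst h
  · rw [show (PySem.Dict.get? bracketMatch ")").getD "" = "(" from by decide]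
    unfold checkpair; split_ifs <;> simp_all
  · rw [show (PySem.Dict.get? bracketMatch "]").getD "" = "[" from by decide]
    unfold checkpair; split_ifs <;> simp_all
  · rw [show (PySem.Dict.get? bracketMatch "}").getD "" = "{" from by decide]
    unfold checkpair; split_ifs <;> simp_all

lemma pass1_none (l : List String) : l.foldl pass1Step none = none := by
  induction l with
  | nil => rfl
  | cons a l ih => simpa [pass1Step] using ih

lemma stepA_toPush (stack : List String) (ch : String) (answer : Int)
    (h : ∀ t, stack.getLast? = some t → checkpair t ch = false) :
    checkstackStep (stack, (stack.length : Int) - 1, answer) ch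
      = (stack ++ [ch], ((stack ++ [ch]).length : Int) - 1, answer) := by
  rcases List.eq_nil_or_concat' stack with rfl | ⟨ys, t, rfl⟩
  · simp [checkstackStep]
  · have hcp : checkpair t ch = false := h t (by simp)
    simp [checkstackStep, hcp]
    omega

lemma stepA_pop (ys : List String) (t ch : String) (answer : Int)
    (h : checkpair t ch = true) :
    checkstackStep (ys ++ [t], ((ys ++ [t]).length : Int) - 1, answer) ch
      = (ys, (ys.length : Int) - 1, if ys = [] then answer + 1 else answer) := by
  simp [checkstackStep, h]

lemma bad_persists : ∀ (l stack : List String) (answer : Int),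
    (∃ x ∈ stack, ¬ IsOpn x) →
    ∃ stack' answer',
      l.foldl checkstackStep (stack, (stack.length : Int) - 1, answer)
        = (stack', (stack'.length : Int) - 1, answer') ∧ ∃ x ∈ stack', ¬ IsOpn x := by
  intro l
  induction l with
  | nil => intro stack answer h; exact ⟨stack, answer, rfl, h⟩
  | cons ch rest ih =>
    intro stack answer h
    rcases h with ⟨x, hx, hxo⟩
    rcases List.eq_nil_or_concat' stack with rfl | ⟨ys, t, rfl⟩
    · simp at hx
    · rw [List.foldl_cons]
      by_cases hcp : checkpair t ch = true
      · -- t is an opener, so the bad x survives the pop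
        have hto : IsOpn t := checkpair_open hcp
        have hxt : x ≠ t := fun he => hxo (he ▸ hto)
        have hxys : x ∈ ys := by
          rcases List.mem_append.mp hx with h1 | h2
          · exact h1
          · simp at h2; exact absurd h2 hxt
        rw [stepA_pop ys t ch answer hcp]
        exact ih ys _ ⟨x, hxys, hxo⟩
      · rw [stepA_toPush (ys ++ [t]) ch answer (by
          intro u hu
          simp at hu
          rw [hu] at hcp
          exact eq_false_of_ne_true hcp)]
        refine ih _ answer ⟨x, ?_, hxo⟩
        simp only [List.mem_append] at hx ⊢
        tauto

lemma main_inv : ∀ (l stack : List String) (answer : Int),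
    (∀ x ∈ stack, IsOpn x) →
    (∃ stack' answer',
        l.foldl checkstackStep (stack, (stack.length : Int) - 1, answer)
          = (stack', (stack'.length : Int) - 1, answer')
      ∧ l.foldl pass1Step (some stack) = some stack'
      ∧ (∀ x ∈ stack', IsOpn x)
      ∧ l.foldl pass2Step ((stack.length : Int), answer) = ((stack'.length : Int), answer'))
    ∨ (∃ stack' answer',
        l.foldl checkstackStep (stack, (stack.length : Int) - 1, answer)
          = (stack', (stack'.length : Int) - 1, answer')
      ∧ stack' ≠ []
      ∧ l.foldl pass1Step (some stack) = none) := by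
  intro l
  induction l with
  | nil => intro stack answer hop; exact Or.inl ⟨stack, answer, rfl, rfl, hop, rfl⟩
  | cons ch rest ih =>
    intro stack answer hop
    rw [List.foldl_cons, List.foldl_cons, List.foldl_cons]
    by_cases hO : ch = "(" ∨ ch = "[" ∨ ch = "{"
    · -- opening bracket: both push
      have hcpf : ∀ t, stack.getLast? = some t → checkpair t ch = false := by
        intro t _
        apply checkpair_false_of_not_closer
        rcases hO with h | h | h <;> subst h <;> simp
      rw [stepA_toPush stack ch answer hcpf]
      have hb1 : pass1Step (some stack) ch = some (stack ++ [ch]) := by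
        simp [pass1Step, hO]
      have hb2 : pass2Step ((stack.length : Int), answer) ch
          = (((stack ++ [ch]).length : Int), answer) := by
        simp [pass2Step, hO]
      rw [hb1, hb2]
      exact ih (stack ++ [ch]) answer (by
        intro x hx
        rcases List.mem_append.mp hx with h1 | h2
        · exact hop x h1
        · simp at h2; exact h2 ▸ hO)
    · by_cases hC : ch = ")" ∨ ch = "]" ∨ ch = "}"
      · rcases List.eq_nil_or_concat' stack with rfl | ⟨ys, t, rfl⟩
        · -- closer on empty stack: A pushes an unmatchable closer, B bails out
          rw [stepA_toPush [] ch answer (by intro t h; simp at h)]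
          have hb1 : pass1Step (some ([] : List String)) ch = none := by
            simp [pass1Step, hO, hC]
          rw [hb1, pass1_none]
          rcases bad_persists rest [ch] answer ⟨ch, by simp, hO⟩ with
            ⟨st', a', hA, x, hx, _⟩
          refine Or.inr ⟨st', a', by simpa using hA, ?_, rfl⟩
          intro he; rw [he] at hx; simp at hx
        · by_cases hm : checkpair t ch = true
          · -- matching closer: both pop; count bumps exactly when the stack empties
            rw [stepA_pop ys t ch answer hm]
            have hb1 : pass1Step (some (ys ++ [t])) ch = some ys := by
              have ht : t = (PySem.Dict.get? bracketMatch ch).getD "" :=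
                (checkpair_iff_match hC).mp hm
              simp [pass1Step, hO, hC, ← ht]
            have hb2 : pass2Step (((ys ++ [t]).length : Int), answer) ch
                = ((ys.length : Int), if ys = [] then answer + 1 else answer) := by
              simp only [pass2Step, if_neg hO]
              rw [show ((ys ++ [t]).length : Int) - 1 = (ys.length : Int) from by simp]
              by_cases hys : ys = []
              · subst hys; simp
              · simp [hys]
            rw [hb1, hb2]
            exact ih ys _ (fun x hx => hop x (by simp [hx]))
          · -- mismatched closer: A pushes it (never matchable), B bails out
            have hstep := stepA_toPush (ys ++ [t]) ch answer (by
              intro u hu; simp at hu; rw [← hu]; exact eq_false_of_ne_true hm)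
            rw [hstep]
            have hb1 : pass1Step (some (ys ++ [t])) ch = none := by
              have ht : t ≠ (PySem.Dict.get? bracketMatch ch).getD "" := by
                intro he; exact hm ((checkpair_iff_match hC).mpr he)
              simp [pass1Step, hO, hC, ht]
            rw [hb1, pass1_none]
            rcases bad_persists rest ((ys ++ [t]) ++ [ch]) answer
              ⟨ch, by simp, hO⟩ with ⟨st', a', hA, x, hx, _⟩
            refine Or.inr ⟨st', a', hA, ?_, rfl⟩
            intro he; rw [he] at hx; simp at hx
      · -- non-bracket character: A pushes it forever, B bails out
        have hstep := stepA_toPush stack ch answer (by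
          intro u _; exact checkpair_false_of_not_closer hC)
        rw [hstep]
        have hb1 : pass1Step (some stack) ch = none := by
          simp [pass1Step, hO, hC]
        rw [hb1, pass1_none]
        rcases bad_persists rest (stack ++ [ch]) answer ⟨ch, by simp, hO⟩ with
          ⟨st', a', hA, x, hx, _⟩
        refine Or.inr ⟨st', a', hA, ?_, rfl⟩
        intro he; rw [he] at hx; simp at hx

-- ===== VERDICT (by name: the statement is the Claim_ definition above) =====
theorem checkstack_spec : Claim_equal_checkstack := by
  intro origins _
  show checkstack origins = checkstack_alt origins
  show (if (List.foldl checkstackStep ([], -1, 0) origins).2.1 = -1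
        then (List.foldl checkstackStep ([], -1, 0) origins).2.2 else 0)
      = (match List.foldl pass1Step (some []) origins with
         | some [] => (List.foldl pass2Step (0, 0) origins).2
         | _ => 0)
  rw [show (([] : List String), (-1 : Int), (0 : Int))
        = (([] : List String), ((([] : List String).length : Int) - 1), (0 : Int)) from by
      norm_num]
  rcases main_inv origins [] 0 (by simp) with
    ⟨st', a', hA, hB1, _, hB2⟩ | ⟨st', a', hA, hne, hB1⟩
  · rw [hA, hB1]
    rcases List.eq_nil_or_concat' st' with rfl | ⟨ys, t, rfl⟩
    · simp only []
      norm_num at hB2 ⊢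
      rw [hB2]
    · have hlen : ((ys ++ [t]).length : Int) - 1 ≠ -1 := by
        simp
      simp only [if_neg hlen]
      cases ys <;> rfl
  · rw [hA, hB1]
    have hlen : ((st'.length : Int) - 1) ≠ -1 := by
      have : 0 < st'.length := List.length_pos_iff.mpr hne
      omega
    show (if (st'.length : Int) - 1 = -1 then a' else 0) = 0
    rw [if_neg hlen]
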